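-- pv_equiv track=rewrite | github.com/cecileDo/TPHadoop | reducer_flickr.py | get_list_tag_by_country
-- ===== SOURCE A (Python) =====
-- def get_list_tag_by_country(data):
--     """
--     for each contry build list of tag
--     """
--     data_dict = dict()
--     for line in data:
--         if line.strip():
--             line = line.strip().split('\t')
--             # line contain country tag values
--             if len(line) == 2:
--                 # create a dict of list of tag
--                 country = line[0]
--                 if country in data_dict:
--                     data_dict[line[0]].append(line[1])
--                 else:
--                     data_dict[line[0]] = [line[1]]
--     return data_dict
-- ===== SOURCE B (Python) =====
-- def get_list_tag_by_country(data):
--     """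
--     for each contry build list of tag
--     """
--     pairs = [(p[0], p[1])
--              for p in (line.strip().split('\t') for line in data if line.strip())
--              if len(p) == 2]
--     countries = list(dict.fromkeys(c for c, _ in pairs))
--     return {c: [t for c2, t in pairs if c2 == c] for c in countries}
-- ===== Notes on version B (the rewrite author's own statement) =====
-- stated objective: alternative
-- what changed: Replaced the single-pass hash grouping (dict lookup/append per line) by a two-phase pairs-then-gather strategy: first flatten the input into a list of (country, tag) pairs, then build each country's tag list by scanning that pairs list per distinct country.
import Mathlib
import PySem

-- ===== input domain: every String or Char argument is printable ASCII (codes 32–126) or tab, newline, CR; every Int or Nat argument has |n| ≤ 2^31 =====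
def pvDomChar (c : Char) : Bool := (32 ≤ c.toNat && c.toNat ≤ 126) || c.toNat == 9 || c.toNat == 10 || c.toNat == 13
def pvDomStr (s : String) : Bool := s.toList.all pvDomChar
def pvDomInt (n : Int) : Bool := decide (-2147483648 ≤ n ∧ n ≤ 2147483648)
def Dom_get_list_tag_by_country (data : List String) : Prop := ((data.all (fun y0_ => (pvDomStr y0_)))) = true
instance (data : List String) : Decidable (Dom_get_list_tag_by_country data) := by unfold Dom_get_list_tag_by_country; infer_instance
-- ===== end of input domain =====

-- B replaces A's single-pass hash grouping by a pairs-then-gather decomposition (alternative; not claimed faster).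

-- ===== PORT A =====
def get_list_tag_by_country (data : List String) : List (String × List String) :=
  (data.foldl (fun data_dict line =>
      let s := PySem.Str.strip line
      if s ≠ "" then
        let parts := (PySem.Str.split? s "\t").getD []
        if parts.length = 2 then
          let country := parts[0]!
          if data_dict.contains country then
            data_dict.modify country [] (· ++ [parts[1]!])
          else
            data_dict.insert country [parts[1]!]
        else data_dict
      else data_dict)
    (PySem.Dict.empty : PySem.Dict String (List String))).items

-- ===== PORT B =====
def get_list_tag_by_country_alt (data : List String) : List (String × List String) :=
  let pairs : List (String × String) := data.filterMap (fun line =>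
    let s := PySem.Str.strip line
    if s ≠ "" then
      let p := (PySem.Str.split? s "\t").getD []
      if p.length = 2 then some (p[0]!, p[1]!) else none
    else none)
  let countries := PySem.List.dedup (pairs.map (·.1))
  countries.map (fun c => (c, (pairs.filter (fun p => p.1 == c)).map (·.2)))

-- ===== PRECONDITION & SPEC =====
def Spec_get_list_tag_by_country (data : List String) (out : List (String × List String)) : Prop := out = get_list_tag_by_country_alt data
instance (data : List String) (out : List (String × List String)) : Decidable (Spec_get_list_tag_by_country data out) := by unfold Spec_get_list_tag_by_country; infer_instance

-- ===== CLAIM (what is proved, stated in full; the proofs are below) =====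
def Claim_equal_get_list_tag_by_country : Prop := ∀ (data : List String), Dom_get_list_tag_by_country data → Spec_get_list_tag_by_country data (get_list_tag_by_country data)

-- ===== LEMMAS AND PROOFS =====

-- the (country, tag) pairs B extracts (same extraction as B's first phase)
def pvPairs (data : List String) : List (String × String) :=
  data.filterMap (fun line =>
    let s := PySem.Str.strip line
    if s ≠ "" then
      let p := (PySem.Str.split? s "\t").getD []
      if p.length = 2 then some (p[0]!, p[1]!) else none
    else none)

theorem pvStep_eq' (d : PySem.Dict String (List String)) (c t : String)
    (h' : ¬ d.contains c = true) :
    d.insert c [t] = d.modify c [] (· ++ [t]) := by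
  have h : d.contains c = false := by cases hb : d.contains c <;> simp_all
  rw [PySem.Dict.modify, PySem.Dict.getD_of_not_contains]
  · simp
  · exact h
theorem pvFold_eq (data : List String) (d : PySem.Dict String (List String)) :
    data.foldl (fun data_dict line =>
      let s := PySem.Str.strip line
      if s ≠ "" then
        let parts := (PySem.Str.split? s "\t").getD []
        if parts.length = 2 then
          let country := parts[0]!
          if data_dict.contains country then
            data_dict.modify country [] (· ++ [parts[1]!])
          else
            data_dict.insert country [parts[1]!]
        else data_dict
      else data_dict) d
    = (pvPairs data).foldl (fun d p => d.modify p.1 [] (· ++ [p.2])) d := by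
  induction data generalizing d with
  | nil => simp [pvPairs]
  | cons line rest ih =>
    rw [List.foldl_cons]
    show _ = (pvPairs (line :: rest)).foldl _ d
    rw [pvPairs, List.filterMap_cons]
    dsimp only
    split_ifs with h1 h2 h3
    · simp only [List.foldl_cons]
      exact ih _
    · simp only [List.foldl_cons]
      rw [pvStep_eq' d _ _ h3]
      exact ih _
    · exact ih d
    · exact ih d

-- ===== VERDICT (by name: the statement is the Claim_ definition above) =====
theorem get_list_tag_by_country_spec : Claim_equal_get_list_tag_by_country := by
  intro data _
  unfold Spec_get_list_tag_by_country get_list_tag_by_country get_list_tag_by_country_alt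
  rw [pvFold_eq]
  have hnd : ((pvPairs data).foldl (fun d p => d.modify p.1 [] (· ++ [p.2]))
      (PySem.Dict.empty : PySem.Dict String (List String))).keys.Nodup := by
    exact PySem.Dict.nodup_keys_foldl_modify_key _ _ _ _ _ (by simp)
  rw [PySem.Dict.items_eq_map_keys _ hnd []]
  rw [PySem.Dict.keys_foldl_modify_key]
  have hkeys : PySem.Set.update (PySem.Dict.empty : PySem.Dict String (List String)).keys
      ((pvPairs data).map (·.1)) = PySem.List.dedup ((pvPairs data).map (·.1)) := by
    simp [PySem.Set.update_eq_append_filter, PySem.List.dedup_eq_ofList, PySem.Dict.keys_empty,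
      PySem.Set.contains]
  rw [hkeys]
  apply List.map_congr_left
  intro k _
  simp [PySem.Dict.getD_foldl_modify_append, pvPairs]
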